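-- pv_equiv track=rewrite | github.com/alimony/cipher_solver | simple.py | _get_common_letters
-- ===== SOURCE A (Python) =====
-- from collections import Counter
-- from string import ascii_lowercase, ascii_uppercase
--
-- def _get_common_letters(text):
--     """Get all unique letters of the passed text, sorted by frequency.
--
--     Parameters
--     ----------
--     text : str
--         The text to find most common letters for.
--
--     Returns
--     -------
--     common_letters : str
--         The letters of the text ordered by frequency.
--
--     Raises
--     ------
--         If the passed text is not a string.
--         If the passed text is empty.
--     """
--
--     if not isinstance(text, str):
--         raise ValueError("{text} is not a string.")
--
--     if len(text) < 1:
--         raise ValueError("Text must not be empty.")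
--
--     c = Counter(text)
--     return "".join(
--         [letter[0] for letter in c.most_common() if letter[0] in ascii_lowercase]
--     )
-- ===== SOURCE B (Python) =====
-- from string import ascii_lowercase
--
-- def _get_common_letters(text):
--     """Counting-sort by frequency: bucket letters per count, emit buckets from
--     the highest count down, keeping first-occurrence order inside each bucket."""
--
--     if not isinstance(text, str):
--         raise ValueError("{text} is not a string.")
--
--     if len(text) < 1:
--         raise ValueError("Text must not be empty.")
--
--     counts = {}
--     for ch in text:
--         counts[ch] = counts.get(ch, 0) + 1
--
--     buckets = {}
--     max_count = 0
--     for ch, n in counts.items():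
--         buckets.setdefault(n, []).append(ch)
--         if n > max_count:
--             max_count = n
--
--     out = []
--     for n in range(max_count, 0, -1):
--         for ch in buckets.get(n, []):
--             if ch in ascii_lowercase:
--                 out.append(ch)
--     return "".join(out)
-- ===== Notes on version B (the rewrite author's own statement) =====
-- stated objective: alternative
-- what changed: Replaces Counter.most_common's stable comparison sort by a counting sort: a dict of per-letter counts, buckets keyed by frequency filled in first-occurrence order, emitted from the maximum frequency down to 1.
import Mathlib
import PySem

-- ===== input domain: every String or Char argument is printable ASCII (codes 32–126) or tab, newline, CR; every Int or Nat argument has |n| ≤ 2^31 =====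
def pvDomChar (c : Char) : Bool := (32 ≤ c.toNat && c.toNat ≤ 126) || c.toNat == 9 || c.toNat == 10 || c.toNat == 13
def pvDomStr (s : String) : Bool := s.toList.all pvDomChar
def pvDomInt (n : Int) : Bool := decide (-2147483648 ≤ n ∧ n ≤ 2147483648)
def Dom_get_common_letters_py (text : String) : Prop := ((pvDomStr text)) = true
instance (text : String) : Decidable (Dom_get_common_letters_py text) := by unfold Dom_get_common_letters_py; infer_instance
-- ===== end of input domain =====

-- B replaces the stable comparison sort (Counter.most_common) by a counting sort:
-- letters are bucketed per frequency and the buckets are emitted from the highest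
-- frequency down, first occurrence first inside a bucket (objective: alternative).

-- ===== PORT A =====
def asciiLowercasePy : List Char := "abcdefghijklmnopqrstuvwxyz".toList

def get_common_letters_py (text : String) : String :=
  let c := PySem.Dict.counter text.toList
  String.ofList
    (((PySem.List.sorted c.items (fun kv => kv.2) true).filter
        (fun kv => PySem.Chars.isIn [kv.1] asciiLowercasePy)).map (fun kv => kv.1))

-- ===== PORT B =====
def get_common_letters_py_alt (text : String) : String :=
  let counts : PySem.Dict Char Int :=
    text.toList.foldl (fun d ch => d.insert ch (d.getD ch 0 + 1)) PySem.Dict.empty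
  let bm : PySem.Dict Int (List Char) × Int :=
    counts.items.foldl
      (fun p kv => (p.1.modify kv.2 [] (· ++ [kv.1]), if kv.2 > p.2 then kv.2 else p.2))
      (PySem.Dict.empty, 0)
  let out : List Char :=
    (PySem.List.pyRange bm.2 0 (-1)).foldl
      (fun acc n =>
        (bm.1.getD n []).foldl
          (fun acc2 ch => if PySem.Chars.isIn [ch] asciiLowercasePy then acc2 ++ [ch] else acc2)
          acc)
      []
  String.ofList out

-- ===== PRECONDITION & SPEC =====
-- A raises ValueError on the empty string; Pre_ excludes exactly that input.
def Pre_get_common_letters_py (text : String) : Prop := text ≠ ""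
instance (text : String) : Decidable (Pre_get_common_letters_py text) := by
  unfold Pre_get_common_letters_py; infer_instance

def pvWitness_get_common_letters_py : String := "banana"

def Spec_get_common_letters_py (text : String) (out : String) : Prop := out = get_common_letters_py_alt text
instance (text : String) (out : String) : Decidable (Spec_get_common_letters_py text out) := by unfold Spec_get_common_letters_py; infer_instance

-- ===== CLAIM (what is proved, stated in full; the proofs are below) =====
def Claim_equal_get_common_letters_py : Prop := ∀ (text : String), Dom_get_common_letters_py text → Pre_get_common_letters_py text → Spec_get_common_letters_py text (get_common_letters_py text)

-- ===== LEMMAS AND PROOFS =====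

-- insertBy passes over a leading block it does not go before
theorem insertBy_append_left {α : Type} (before : α → α → Bool) (x : α) (l1 l2 : List α)
    (h : ∀ y ∈ l1, before x y = false) :
    PySem.List.insertBy before x (l1 ++ l2) = l1 ++ PySem.List.insertBy before x l2 := by
  induction l1 with
  | nil => simp
  | cons a t ih =>
    simp only [List.cons_append, PySem.List.insertBy]
    rw [h a (List.mem_cons_self), ih (fun y hy => h y (List.mem_cons_of_mem a hy))]
    simp

-- insertBy stops at the front of a list it goes before everywhere
theorem insertBy_cons_of_forall_before {α : Type} (before : α → α → Bool) (x : α) (l : List α)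
    (h : ∀ y ∈ l, before x y = true) :
    PySem.List.insertBy before x l = x :: l := by
  cases l with
  | nil => rfl
  | cons a t => simp [PySem.List.insertBy, h a List.mem_cons_self]

-- inserting one element into a descending bucket decomposition appends it to its bucket
theorem insert_into_buckets (x : Char × Int) (ys : List (Char × Int)) (fs : List Int)
    (hp : fs.Pairwise (· > ·)) (hx : x.2 ∈ fs) :
    PySem.List.insertBy (fun a b => decide (b.2 < a.2)) x
        (fs.flatMap (fun f => ys.filter (fun kv => kv.2 = f)))
      = fs.flatMap (fun f => (ys ++ [x]).filter (fun kv => kv.2 = f)) := by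
  induction fs with
  | nil => cases hx
  | cons f rest ih =>
    have hgt : ∀ g ∈ rest, f > g := (List.pairwise_cons.mp hp).1
    have hp' : rest.Pairwise (· > ·) := (List.pairwise_cons.mp hp).2
    by_cases hxf : x.2 = f
    · -- x belongs to the head bucket: goes after that bucket, before all of the rest
      have h1 : ∀ y ∈ ys.filter (fun kv => kv.2 = f), (fun a b => decide (b.2 < a.2)) x y = false := by
        intro y hy
        have := (List.mem_filter.mp hy).2
        simp only [decide_eq_true_eq] at this
        simp [this, hxf]
      have h2 : ∀ y ∈ rest.flatMap (fun g => ys.filter (fun kv => kv.2 = g)),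
          (fun a b => decide (b.2 < a.2)) x y = true := by
        intro y hy
        obtain ⟨g, hg, hyg⟩ := List.mem_flatMap.mp hy
        have := (List.mem_filter.mp hyg).2
        simp only [decide_eq_true_eq] at this
        have : y.2 < x.2 := by rw [this, hxf]; exact hgt g hg
        simpa using this
      rw [List.flatMap_cons, insertBy_append_left _ _ _ _ h1,
        insertBy_cons_of_forall_before _ _ _ h2]
      rw [List.flatMap_cons]
      have hhead : (ys ++ [x]).filter (fun kv => kv.2 = f) = ys.filter (fun kv => kv.2 = f) ++ [x] := by
        simp [List.filter_append, hxf]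
      have hrest : rest.flatMap (fun g => (ys ++ [x]).filter (fun kv => kv.2 = g))
          = rest.flatMap (fun g => ys.filter (fun kv => kv.2 = g)) := by
        apply List.flatMap_congr
        intro g hg
        have : ¬ (x.2 = g) := by have := hgt g hg; omega
        simp [List.filter_append, this]
      rw [hhead, hrest]; simp
    · -- x belongs to a later bucket
      have hx' : x.2 ∈ rest := by cases hx with
        | head => exact absurd rfl hxf
        | tail _ h => exact h
      have hfx : x.2 < f := hgt _ hx'
      have h1 : ∀ y ∈ ys.filter (fun kv => kv.2 = f), (fun a b => decide (b.2 < a.2)) x y = false := by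
        intro y hy
        have := (List.mem_filter.mp hy).2
        simp only [decide_eq_true_eq] at this
        simp [this]; omega
      rw [List.flatMap_cons, insertBy_append_left _ _ _ _ h1, ih hp' hx']
      rw [List.flatMap_cons]
      have hhead : (ys ++ [x]).filter (fun kv => kv.2 = f) = ys.filter (fun kv => kv.2 = f) := by
        simp [List.filter_append, hxf]
      rw [hhead]

-- the stable reverse sort by an Int key is the descending bucket concatenation
theorem sorted_rev_eq_buckets (xs : List (Char × Int)) (fs : List Int)
    (hp : fs.Pairwise (· > ·)) (hcov : ∀ x ∈ xs, x.2 ∈ fs) :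
    PySem.List.sorted xs (fun kv => kv.2) true
      = fs.flatMap (fun f => xs.filter (fun kv => kv.2 = f)) := by
  rw [PySem.List.sorted_rev_eq_foldl_insertBy]
  induction xs using List.reverseRecOn with
  | nil => simp
  | append_singleton ys x ih =>
    rw [List.foldl_append, List.foldl_cons, List.foldl_nil,
      ih (fun y hy => hcov y (List.mem_append_left _ hy))]
    exact insert_into_buckets x ys fs hp (hcov x (by simp))

-- the bucket dictionary built by B's second loop
theorem bucket_getD (items : List (Char × Int)) :
    ∀ (d0 : PySem.Dict Int (List Char)) (m0 : Int) (f : Int),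
    ((items.foldl
        (fun p kv => (p.1.modify kv.2 [] (· ++ [kv.1]), if kv.2 > p.2 then kv.2 else p.2))
        (d0, m0)).1).getD f []
      = d0.getD f [] ++ (items.filter (fun kv => kv.2 = f)).map (fun kv => kv.1) := by
  induction items with
  | nil => simp
  | cons kv t ih =>
    intro d0 m0 f
    rw [List.foldl_cons, ih]
    by_cases h : kv.2 = f
    · simp [PySem.Dict.modify, h]
    · have h' : ¬ (f = kv.2) := fun hc => h hc.symm
      simp [PySem.Dict.modify, PySem.Dict.getD_insert, h, h']

-- the running maximum carried by B's second loop
theorem bucket_max (items : List (Char × Int)) :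
    ∀ (d0 : PySem.Dict Int (List Char)) (m0 : Int),
    (items.foldl
        (fun p kv => (p.1.modify kv.2 [] (· ++ [kv.1]), if kv.2 > p.2 then kv.2 else p.2))
        (d0, m0)).2
      = items.foldl (fun m kv => max m kv.2) m0 := by
  induction items with
  | nil => intro d0 m0; rfl
  | cons kv t ih =>
    intro d0 m0
    rw [List.foldl_cons, List.foldl_cons, ih]
    congr 1
    by_cases h : kv.2 > m0 <;> simp [h] <;> omega

-- range(n, 0, -1) written as a mapped List.range
theorem pyRange_down (n : Int) :
    PySem.List.pyRange n 0 (-1) = (List.range n.toNat).map (fun k : Nat => n - (k : Int)) := by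
  have e : PySem.List.pyRange n 0 (-1)
      = List.map (fun k : Nat => n + -1 * (k:Int))
          (List.range (if (0:Int) < n then ((n - 0 + -(-1) - 1) / -(-1)).toNat else 0)) := by
    simp only [PySem.List.pyRange]; norm_num
  rw [e]
  by_cases h : 0 < n
  · rw [if_pos h]
    have hd : ((n:Int) - 0 + -(-1) - 1) / -(-1) = n := by norm_num
    rw [hd]
    exact List.map_congr_left (fun a _ => by ring)
  · rw [if_neg h]
    have h2 : n.toNat = 0 := by omega
    rw [h2]; rfl

theorem mem_pyRange_down (n f : Int) :
    f ∈ PySem.List.pyRange n 0 (-1) ↔ 1 ≤ f ∧ f ≤ n := by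
  rw [pyRange_down]
  simp only [List.mem_map, List.mem_range]
  constructor
  · rintro ⟨k, hk, rfl⟩; omega
  · rintro ⟨h1, h2⟩; exact ⟨(n - f).toNat, by omega, by omega⟩

theorem pairwise_pyRange_down (n : Int) :
    (PySem.List.pyRange n 0 (-1)).Pairwise (· > ·) := by
  rw [pyRange_down]
  exact (List.pairwise_lt_range).map _ (by intro a b h; simp; omega)

-- B's inner character loop is a filter
theorem foldl_if_append_filter (p : Char → Bool) (l : List Char) (acc : List Char) :
    l.foldl (fun acc2 ch => if p ch then acc2 ++ [ch] else acc2) acc = acc ++ l.filter p := by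
  simpa using PySem.List.foldl_append_if p id l acc

-- ===== VERDICT (by name: the statement is the Claim_ definition above) =====
theorem get_common_letters_py_spec : Claim_equal_get_common_letters_py := by
  intro text _ _
  unfold Spec_get_common_letters_py get_common_letters_py get_common_letters_py_alt
  dsimp only
  simp only [PySem.Dict.foldl_insert_getD_add_one_eq_counter]
  set xs := text.toList with hxs
  set items := (PySem.Dict.counter xs).items with hitems
  set bm := items.foldl
      (fun p kv => (p.1.modify kv.2 [] (· ++ [kv.1]), if kv.2 > p.2 then kv.2 else p.2))
      ((PySem.Dict.empty : PySem.Dict Int (List Char)), 0) with hbm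
  have hmax : bm.2 = items.foldl (fun m kv => max m kv.2) 0 := bucket_max items _ _
  have hbucket : ∀ f : Int,
      bm.1.getD f [] = (items.filter (fun kv => kv.2 = f)).map (fun kv => kv.1) := by
    intro f
    rw [hbm, bucket_getD items PySem.Dict.empty 0 f]
    simp
  have hcov : ∀ x ∈ items, x.2 ∈ PySem.List.pyRange bm.2 0 (-1) := by
    intro x hx
    rw [mem_pyRange_down]
    refine ⟨?_, ?_⟩
    · rw [hitems, PySem.Dict.items_counter] at hx
      obtain ⟨k, hk, rfl⟩ := List.mem_map.mp hx
      have hk' : k ∈ xs := (PySem.Set.mem_ofList xs k).mp hk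
      have hpos := List.count_pos_iff.mpr hk'
      simp only []
      omega
    · rw [hmax]
      simpa using (PySem.List.le_foldl_max_int items (fun kv => kv.2) 0).2 x hx
  rw [sorted_rev_eq_buckets items _ (pairwise_pyRange_down bm.2) hcov]
  simp only [foldl_if_append_filter, PySem.List.foldl_append_eq_flatMap, List.nil_append]
  congr 1
  rw [List.filter_flatMap, List.map_flatMap]
  apply List.flatMap_congr
  intro f _
  rw [hbucket f, List.filter_map]
  rfl
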